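-- pv_equiv track=rewrite | github.com/hannah-harrington/weekly-sales-insights | pipeline/sources/sfdc_bq.py | match_person_contact
-- ===== SOURCE A (Python) =====
-- def match_person_contact(people_data: dict, account_name: str, title: str, full_name: str = "") -> dict | None:
--     """
--     Given a Demandbase person's account + name + title, find the best SFDC contact match.
--
--     Priority: exact name match → exact title match → title word-overlap.
--     Returns the enriched contact dict (name, title, email, contact_url, days_since_contact, in_sfdc) or None.
--     """
--     contacts = people_data.get(account_name.lower().strip(), [])
--     if not contacts:
--         return None
--
--     # 1. Exact name match (most reliable — requires sdp-pii)
--     if full_name: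
--         name_lower = full_name.lower().strip()
--         for c in contacts:
--             if c.get("name", "").lower().strip() == name_lower:
--                 return c
--
--     title_lower = (title or "").lower().strip()
--
--     # 2. Exact title match
--     for c in contacts:
--         if c["title"].lower().strip() == title_lower:
--             return c
--
--     # 3. Word-overlap match — at least 2 significant words in common
--     title_words = set(w for w in title_lower.split() if len(w) > 3)
--     best = None
--     best_overlap = 0
--     for c in contacts:
--         c_words = set(w for w in c["title"].lower().split() if len(w) > 3)
--         overlap = len(title_words & c_words)
--         if overlap >= 2 and overlap > best_overlap:
--             best_overlap = overlap
--             best = c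
--
--     return best
-- ===== SOURCE B (Python) =====
-- def match_person_contact(people_data: dict, account_name: str, title: str, full_name: str = "") -> dict | None:
--     """Single fused scan: exact-name pass, then one pass over contacts that
--     returns immediately on an exact title match and otherwise tracks the best
--     word-overlap candidate (>=2 significant shared words, strictly improving)."""
--     contacts = people_data.get(account_name.lower().strip(), [])
--     if not contacts:
--         return None
--
--     if full_name:
--         name_lower = full_name.lower().strip()
--         hit = next((c for c in contacts if c.get("name", "").lower().strip() == name_lower), None)
--         if hit is not None:
--             return hit
--
--     title_lower = (title or "").lower().strip()
--     title_words = {w for w in title_lower.split() if len(w) > 3}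
--
--     best = None
--     best_overlap = 0
--     for c in contacts:
--         tl = c["title"].lower()
--         if tl.strip() == title_lower:
--             return c
--         overlap = len(title_words & {w for w in tl.split() if len(w) > 3})
--         if overlap >= 2 and overlap > best_overlap:
--             best_overlap = overlap
--             best = c
--     return best
-- ===== Notes on version B (the rewrite author's own statement) =====
-- stated objective: simpler
-- what changed: B keeps the exact-name pass but fuses A's two subsequent scans (exact-title scan, then word-overlap scan) into a single pass over the contacts that returns immediately on an exact title match and otherwise tracks the best overlap candidate, lowering each contact's title once per contact instead of twice.
import Mathlib
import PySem

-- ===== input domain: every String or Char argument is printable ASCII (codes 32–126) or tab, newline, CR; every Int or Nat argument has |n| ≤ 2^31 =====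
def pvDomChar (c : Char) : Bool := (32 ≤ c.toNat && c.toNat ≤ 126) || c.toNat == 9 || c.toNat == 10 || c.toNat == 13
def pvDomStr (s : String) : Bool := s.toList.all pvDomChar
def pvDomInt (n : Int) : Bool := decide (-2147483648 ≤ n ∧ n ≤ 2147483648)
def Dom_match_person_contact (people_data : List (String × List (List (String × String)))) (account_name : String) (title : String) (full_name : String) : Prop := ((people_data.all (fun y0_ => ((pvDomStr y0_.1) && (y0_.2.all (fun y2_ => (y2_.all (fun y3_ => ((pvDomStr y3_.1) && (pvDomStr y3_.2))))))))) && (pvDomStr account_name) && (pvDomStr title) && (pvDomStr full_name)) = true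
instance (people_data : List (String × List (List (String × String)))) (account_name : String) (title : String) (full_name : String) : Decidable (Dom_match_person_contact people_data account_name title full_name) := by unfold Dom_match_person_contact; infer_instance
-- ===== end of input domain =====

-- B fuses A's separate exact-title scan and word-overlap scan into ONE pass over the
-- contacts (return on exact title, else track the best overlap); objective: simpler.

-- shared small helpers (common subexpressions of both Python sources)
-- s.lower().strip()
def pvNorm (s : String) : String := PySem.Str.strip (PySem.Str.lower s)
-- set(w for w in s.split() if len(w) > 3)
def pvWords (s : String) : PySem.Set String :=
  PySem.Set.ofList ((PySem.Str.split₀ s).filter (fun w => 3 < PySem.Str.len w))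
-- people_data.get(account_name.lower().strip(), [])
def pvContacts (people_data : List (String × List (List (String × String)))) (account_name : String) : List (List (String × String)) :=
  PySem.Dict.getD (PySem.Dict.mk people_data) (pvNorm account_name) []

-- ===== PORT A =====
-- loop 1: first contact whose c.get("name","").lower().strip() equals name_lower
def pvLoopName : List (List (String × String)) → String → Option (List (String × String))
  | [], _ => none
  | c :: rest, nl =>
      if pvNorm (PySem.Dict.getD (PySem.Dict.mk c) "name" "") == nl then some c
      else pvLoopName rest nl

-- loop 2: first exact title match; outer none = KeyError on c["title"]
def pvLoopTitleA : List (List (String × String)) → String → Option (Option (List (String × String)))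
  | [], _ => some none
  | c :: rest, tl =>
      match (PySem.Dict.mk c).get? "title" with
      | none => none
      | some t => if pvNorm t == tl then some (some c) else pvLoopTitleA rest tl

-- loop 3: best word-overlap candidate; outer none = KeyError on c["title"]
def pvLoopOverlapA : List (List (String × String)) → PySem.Set String → Option (List (String × String)) → Int → Option (Option (List (String × String)))
  | [], _, best, _ => some best
  | c :: rest, tw, best, bo =>
      match (PySem.Dict.mk c).get? "title" with
      | none => none
      | some t =>
          let ov := PySem.Set.len (PySem.Set.inter tw (pvWords (PySem.Str.lower t)))
          if 2 ≤ ov ∧ bo < ov then pvLoopOverlapA rest tw (some c) ov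
          else pvLoopOverlapA rest tw best bo

def match_person_contact (people_data : List (String × List (List (String × String)))) (account_name : String) (title : String) (full_name : String) : Option (List (String × String)) :=
  let contacts := pvContacts people_data account_name
  if contacts.isEmpty then none
  else
    match (if full_name ≠ "" then pvLoopName contacts (pvNorm full_name) else none) with
    | some c => some c
    | none =>
        let tl := pvNorm title
        match pvLoopTitleA contacts tl with
        | none => none          -- KeyError (excluded by Pre_)
        | some (some c) => some c
        | some none =>
            match pvLoopOverlapA contacts (pvWords tl) none 0 with
            | none => none      -- KeyError (excluded by Pre_)
            | some best => best

-- ===== PORT B =====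
-- single fused scan: return on exact title, else update the best-overlap pair
def pvLoopFusedB : List (List (String × String)) → String → PySem.Set String → Option (List (String × String)) → Int → Option (Option (List (String × String)))
  | [], _, _, best, _ => some best
  | c :: rest, tl, tw, best, bo =>
      match (PySem.Dict.mk c).get? "title" with
      | none => none            -- KeyError (excluded by Pre_)
      | some t =>
          let tlow := PySem.Str.lower t
          if PySem.Str.strip tlow == tl then some (some c)
          else
            let ov := PySem.Set.len (PySem.Set.inter tw (pvWords tlow))
            if 2 ≤ ov ∧ bo < ov then pvLoopFusedB rest tl tw (some c) ov
            else pvLoopFusedB rest tl tw best bo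

def match_person_contact_alt (people_data : List (String × List (List (String × String)))) (account_name : String) (title : String) (full_name : String) : Option (List (String × String)) :=
  let contacts := pvContacts people_data account_name
  if contacts.isEmpty then none
  else
    let nameHit :=
      if full_name ≠ "" then
        contacts.find? (fun c => pvNorm (PySem.Dict.getD (PySem.Dict.mk c) "name" "") == pvNorm full_name)
      else none
    match nameHit with
    | some c => some c
    | none =>
        let tl := pvNorm title
        match pvLoopFusedB contacts tl (pvWords tl) none 0 with
        | none => none          -- KeyError (excluded by Pre_)
        | some best => best

-- ===== PRECONDITION & SPEC =====
-- Pre_ excludes exactly the inputs where Python A raises KeyError: some contact of the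
-- selected account lacks a "title" key and is reached before A returns (no exact-name
-- rescue and no exact-title match preceded by title-bearing contacts).
def Pre_match_person_contact (people_data : List (String × List (List (String × String)))) (account_name : String) (title : String) (full_name : String) : Prop :=
  (full_name ≠ "" ∧ ∃ c ∈ pvContacts people_data account_name,
      pvNorm (PySem.Dict.getD (PySem.Dict.mk c) "name" "") = pvNorm full_name)
  ∨ ∃ n : Fin ((pvContacts people_data account_name).length + 1),
      (∀ c ∈ (pvContacts people_data account_name).take n,
          ((PySem.Dict.mk c).get? "title").isSome = true)
      ∧ ((n : Nat) = (pvContacts people_data account_name).length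
         ∨ ∃ c, (pvContacts people_data account_name)[(n : Nat)]? = some c
             ∧ ∃ t, (PySem.Dict.mk c).get? "title" = some t ∧ pvNorm t = pvNorm title)
instance (people_data : List (String × List (List (String × String)))) (account_name : String) (title : String) (full_name : String) : Decidable (Pre_match_person_contact people_data account_name title full_name) := by unfold Pre_match_person_contact; infer_instance

def pvWitness_match_person_contact : (List (String × List (List (String × String)))) × String × String × String :=
  ([("acme", [[("title", "VP Sales")], [("title", "chief of staff"), ("name", "Ann B")]])], "Acme ", "vp sales", "ann b")

def Spec_match_person_contact (people_data : List (String × List (List (String × String)))) (account_name : String) (title : String) (full_name : String) (out : Option (List (String × String))) : Prop := out = match_person_contact_alt people_data account_name title full_name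
instance (people_data : List (String × List (List (String × String)))) (account_name : String) (title : String) (full_name : String) (out : Option (List (String × String))) : Decidable (Spec_match_person_contact people_data account_name title full_name out) := by unfold Spec_match_person_contact; infer_instance

-- ===== CLAIM (what is proved, stated in full; the proofs are below) =====
def Claim_equal_match_person_contact : Prop := ∀ (people_data : List (String × List (List (String × String)))) (account_name : String) (title : String) (full_name : String), Dom_match_person_contact people_data account_name title full_name → Pre_match_person_contact people_data account_name title full_name → Spec_match_person_contact people_data account_name title full_name (match_person_contact people_data account_name title full_name)

-- ===== LEMMAS AND PROOFS =====
-- A's hand-written name loop is List.find? of the same predicate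
theorem pvLoopName_eq_find? (cs : List (List (String × String))) (nl : String) :
    pvLoopName cs nl
      = cs.find? (fun c => pvNorm (PySem.Dict.getD (PySem.Dict.mk c) "name" "") == nl) := by
  induction cs with
  | nil => rfl
  | cons c rest ih =>
      by_cases h : pvNorm (PySem.Dict.getD (PySem.Dict.mk c) "name" "") == nl
      · simp [pvLoopName, List.find?, h]
      · simp only [Bool.not_eq_true] at h
        simp [pvLoopName, List.find?, h]
        exact ih

-- fusion: one pass over the contacts equals A's exact-title scan followed by its overlap scan
theorem pvLoopFusedB_eq (cs : List (List (String × String))) (tl : String)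
    (tw : PySem.Set String) (best : Option (List (String × String))) (bo : Int) :
    pvLoopFusedB cs tl tw best bo
      = match pvLoopTitleA cs tl with
        | none => none
        | some (some c) => some (some c)
        | some none => pvLoopOverlapA cs tw best bo := by
  induction cs generalizing best bo with
  | nil => rfl
  | cons c rest ih =>
      cases ht : (PySem.Dict.mk c).get? "title" with
      | none => simp [pvLoopFusedB, pvLoopTitleA, ht]
      | some t =>
          by_cases hx : PySem.Str.strip (PySem.Str.lower t) == tl
          · simp [pvLoopFusedB, pvLoopTitleA, pvNorm, ht, hx]
          · simp only [Bool.not_eq_true] at hx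
            by_cases hov : 2 ≤ PySem.Set.len (PySem.Set.inter tw (pvWords (PySem.Str.lower t)))
                           ∧ bo < PySem.Set.len (PySem.Set.inter tw (pvWords (PySem.Str.lower t)))
            · simp only [pvLoopFusedB, pvLoopTitleA, pvLoopOverlapA, pvNorm, ht, hx, if_pos hov, Bool.false_eq_true, if_false]
              rw [ih]
            · simp only [pvLoopFusedB, pvLoopTitleA, pvLoopOverlapA, pvNorm, ht, hx, if_neg hov, Bool.false_eq_true, if_false]
              rw [ih]

-- ===== VERDICT (by name: the statement is the Claim_ definition above) =====
theorem match_person_contact_spec : Claim_equal_match_person_contact := by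
  intro people_data account_name title full_name _ _
  unfold Spec_match_person_contact
  simp only [match_person_contact, match_person_contact_alt, pvLoopName_eq_find?, pvLoopFusedB_eq]
  cases pvLoopTitleA (pvContacts people_data account_name) (pvNorm title) with
  | none => rfl
  | some o => cases o <;> rfl
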